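-- pv_equiv track=rewrite | github.com/pypi-data/pypi-mirror-323 | packages/basketcase/basketcase-7.2.0.tar.gz/basketcase-7.2.0/src/basketcase/extractor.py | find_best_size
-- ===== SOURCE A (Python) =====
-- def find_best_size(
--
--     options: list,
--     original_width: int = None,
--     original_height: int = None
-- ) -> dict:
--     """
--     Returns the best resolution from a list of "image_versions2.candidates" or "video_versions"
--     :param original_height:
--     :param original_width:
--     :param options:
--     :return:
--     """
--     selected = options[0]
--
--     for option in options:
--         if (original_height and original_width) and (
--             option['width'] == original_width and option['height'] == original_height
--         ):
--             selected = option
--             break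
--
--         if (option['width'] + option['height']) > (selected['width'] + selected['height']):
--             selected = option
--
--     return selected
-- ===== SOURCE B (Python) =====
-- def find_best_size(
--     options: list,
--     original_width: int = None,
--     original_height: int = None
-- ) -> dict:
--     # B: two separate passes instead of one interleaved loop — first an
--     # exact-dimension search (early return), then an independent max-by-sum scan.
--     if original_width and original_height:
--         for option in options:
--             if option['width'] == original_width and option['height'] == original_height:
--                 return option
--     best = options[0]
--     for option in options:
--         if option['width'] + option['height'] > best['width'] + best['height']:
--             best = option
--     return best
-- ===== Notes on version B (the rewrite author's own statement) =====
-- stated objective: simpler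
-- what changed: A's single loop that interleaves the exact-match break with the running max is split into two independent linear passes: a first-exact-match search with early return, then a plain max-by-(width+height) scan seeded with options[0].
import Mathlib
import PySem

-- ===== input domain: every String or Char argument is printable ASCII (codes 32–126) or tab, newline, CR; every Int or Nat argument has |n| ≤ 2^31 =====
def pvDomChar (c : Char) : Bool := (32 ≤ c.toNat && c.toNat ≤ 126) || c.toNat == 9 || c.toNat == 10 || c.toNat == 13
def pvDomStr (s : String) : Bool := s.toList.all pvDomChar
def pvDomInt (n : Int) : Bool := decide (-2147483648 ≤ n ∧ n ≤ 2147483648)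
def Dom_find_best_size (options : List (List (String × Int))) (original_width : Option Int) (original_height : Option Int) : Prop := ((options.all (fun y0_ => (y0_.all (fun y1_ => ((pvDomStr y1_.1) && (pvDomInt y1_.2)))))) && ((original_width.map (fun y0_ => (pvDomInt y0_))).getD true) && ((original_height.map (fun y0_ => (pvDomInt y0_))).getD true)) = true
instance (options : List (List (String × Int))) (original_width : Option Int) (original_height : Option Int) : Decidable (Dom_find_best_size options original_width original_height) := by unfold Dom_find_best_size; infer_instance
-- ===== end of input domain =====

-- B replaces A's single loop (interleaving the exact-match break with the running max)
-- by two independent linear passes: first-exact-match with early return, then max-by-sum.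


-- Python truthiness of an Optional[int]: None and 0 are falsy
def pvTruthy : Option Int → Bool
  | none => false
  | some v => v != 0

-- option['k']: first-match association-list lookup (0 only where Pre_ already excludes the KeyError)
def pvGetD (o : List (String × Int)) (k : String) : Int :=
  match o.find? (fun p => p.1 == k) with
  | some p => p.2
  | none => 0

-- ===== PORT A =====
-- A's for-loop: state 'selected'; break (returning o) on exact match under the truthy guard
def findLoopA (ow oh : Option Int) : List (List (String × Int)) → List (String × Int) → List (String × Int)
  | [], sel => sel
  | o :: rest, sel =>
    if ((pvTruthy oh && pvTruthy ow) &&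
        (pvGetD o "width" == ow.getD 0 && pvGetD o "height" == oh.getD 0)) = true then o
    else findLoopA ow oh rest
      (if pvGetD o "width" + pvGetD o "height" > pvGetD sel "width" + pvGetD sel "height" then o else sel)

def find_best_size (options : List (List (String × Int))) (original_width : Option Int) (original_height : Option Int) : List (String × Int) :=
  match options with
  | [] => []  -- options[0] raises IndexError; excluded by Pre_
  | o0 :: _ => findLoopA original_width original_height options o0

-- ===== PORT B =====
-- B's first pass: first option matching the dimensions exactly
def firstMatchB (w h : Int) : List (List (String × Int)) → Option (List (String × Int))
  | [] => none
  | o :: rest => if (pvGetD o "width" == w && pvGetD o "height" == h) = true then some o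
                 else firstMatchB w h rest

-- B's second pass: running max by width+height, strict '>' keeps the first maximum
def maxPassB : List (List (String × Int)) → List (String × Int) → List (String × Int)
  | [], best => best
  | o :: rest, best => maxPassB rest
      (if pvGetD o "width" + pvGetD o "height" > pvGetD best "width" + pvGetD best "height" then o else best)

def find_best_size_alt (options : List (List (String × Int))) (original_width : Option Int) (original_height : Option Int) : List (String × Int) :=
  match (if pvTruthy original_width && pvTruthy original_height then
           firstMatchB (original_width.getD 0) (original_height.getD 0) options
         else none) with
  | some o => o
  | none =>
    match options with
    | [] => []  -- options[0] raises IndexError; excluded by Pre_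
    | o0 :: _ => maxPassB options o0

-- ===== PRECONDITION & SPEC =====
-- A raises IndexError on an empty list and KeyError when an option lacks 'width' or 'height'.
-- Slight narrowing: when an early exact-match break fires, A never inspects the later options,
-- so it does return on some inputs whose later options lack keys; B returns the same match there.
def Pre_find_best_size (options : List (List (String × Int))) (original_width : Option Int) (original_height : Option Int) : Prop :=
  options ≠ [] ∧ ∀ o ∈ options,
    (o.find? (fun p => p.1 == "width")).isSome ∧ (o.find? (fun p => p.1 == "height")).isSome
instance (options : List (List (String × Int))) (original_width : Option Int) (original_height : Option Int) : Decidable (Pre_find_best_size options original_width original_height) := by unfold Pre_find_best_size; infer_instance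

def pvWitness_find_best_size : (List (List (String × Int))) × Option Int × Option Int :=
  ([[("width", 1), ("height", 2)], [("width", 3), ("height", 1)]], some 1, some 2)

def Spec_find_best_size (options : List (List (String × Int))) (original_width : Option Int) (original_height : Option Int) (out : List (String × Int)) : Prop := out = find_best_size_alt options original_width original_height
instance (options : List (List (String × Int))) (original_width : Option Int) (original_height : Option Int) (out : List (String × Int)) : Decidable (Spec_find_best_size options original_width original_height out) := by unfold Spec_find_best_size; infer_instance

-- ===== CLAIM (what is proved, stated in full; the proofs are below) =====
def Claim_equal_find_best_size : Prop := ∀ (options : List (List (String × Int))) (original_width : Option Int) (original_height : Option Int), Dom_find_best_size options original_width original_height → Pre_find_best_size options original_width original_height → Spec_find_best_size options original_width original_height (find_best_size options original_width original_height)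

-- ===== LEMMAS AND PROOFS =====

-- when the truthy guard is off, A's loop is exactly B's max pass
lemma loopA_no_guard (ow oh : Option Int) (hg : (pvTruthy ow && pvTruthy oh) = false) :
    ∀ (l : List (List (String × Int))) (sel : List (String × Int)),
      findLoopA ow oh l sel = maxPassB l sel := by
  intro l
  induction l with
  | nil => intro sel; rfl
  | cons o rest ih =>
    intro sel
    have hg' : (pvTruthy oh && pvTruthy ow) = false := by
      cases h1 : pvTruthy ow <;> cases h2 : pvTruthy oh <;> simp_all
    simp [findLoopA, maxPassB, hg', ih]

-- guard on, a first exact match exists: A's loop breaks with exactly that match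
lemma loopA_some (ow oh : Option Int) (hg : (pvTruthy ow && pvTruthy oh) = true) :
    ∀ (l : List (List (String × Int))) (sel o : List (String × Int)),
      firstMatchB (ow.getD 0) (oh.getD 0) l = some o → findLoopA ow oh l sel = o := by
  intro l
  induction l with
  | nil => intro sel o h; simp [firstMatchB] at h
  | cons x rest ih =>
    intro sel o h
    have hg' : (pvTruthy oh && pvTruthy ow) = true := by
      cases h1 : pvTruthy ow <;> cases h2 : pvTruthy oh <;> simp_all
    by_cases hm : (pvGetD x "width" == ow.getD 0 && pvGetD x "height" == oh.getD 0) = true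
    · simp only [firstMatchB, if_pos hm, Option.some.injEq] at h
      subst h
      rw [findLoopA, if_pos (by simp [hg', hm])]
    · simp [firstMatchB, hm] at h
      simp [findLoopA, hg', hm, ih _ _ h]

-- guard on, no exact match anywhere: A's loop is B's max pass
lemma loopA_none (ow oh : Option Int) :
    ∀ (l : List (List (String × Int))) (sel : List (String × Int)),
      firstMatchB (ow.getD 0) (oh.getD 0) l = none → findLoopA ow oh l sel = maxPassB l sel := by
  intro l
  induction l with
  | nil => intro sel _; rfl
  | cons x rest ih =>
    intro sel h
    by_cases hm : (pvGetD x "width" == ow.getD 0 && pvGetD x "height" == oh.getD 0) = true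
    · simp [firstMatchB, hm] at h
    · simp [firstMatchB, hm] at h
      simp [findLoopA, hm, ih _ h, maxPassB]

-- ===== VERDICT (by name: the statement is the Claim_ definition above) =====
theorem find_best_size_spec : Claim_equal_find_best_size := by
  intro options ow oh _ hpre
  unfold Spec_find_best_size
  obtain ⟨hne, -⟩ := hpre
  obtain ⟨o0, rest, rfl⟩ : ∃ o0 rest, options = o0 :: rest := by
    cases options with
    | nil => exact absurd rfl hne
    | cons a l => exact ⟨a, l, rfl⟩
  by_cases hg : (pvTruthy ow && pvTruthy oh) = true
  · cases hfm : firstMatchB (ow.getD 0) (oh.getD 0) (o0 :: rest) with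
    | some o =>
      simp only [find_best_size, find_best_size_alt, hg, hfm]
      exact loopA_some ow oh hg _ _ _ hfm
    | none =>
      simp only [find_best_size, find_best_size_alt, hg, hfm]
      exact loopA_none ow oh _ _ hfm
  · have hg' : (pvTruthy ow && pvTruthy oh) = false := by simpa using hg
    simp only [find_best_size, find_best_size_alt, hg', Bool.false_eq_true, if_false]
    exact loopA_no_guard ow oh hg' _ _
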